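-- pv_equiv track=rewrite | github.com/bobowedge/advent-of-code-2025 | day12.py | also_good
-- ===== SOURCE A (Python) =====
-- from math import prod
--
-- def also_good(tree_dims, present_counts):
--     """
--     Pieces 0, 2, 4 fit into a 5x4 grid:
--        444.
--        444.
--        4002
--        0022
--        0222
--     So, account for that reduction
--     """
--     total_size = prod(tree_dims)
--     combo1 = min(present_counts[0], present_counts[2], present_counts[4])
--     max_area = combo1 * 20
--     new_counts = (
--         present_counts[0] - combo1,
--         present_counts[1],
--         present_counts[2] - combo1,
--         present_counts[3],
--         present_counts[4] - combo1,
--         present_counts[5],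
--     )
--     for count in new_counts:
--         max_area += 9 * count
--     return max_area < total_size
-- ===== SOURCE B (Python) =====
-- def also_good(tree_dims, present_counts):
--     volume = 1
--     for d in tree_dims:
--         volume *= d
--
--     def area(k, m):
--         # m: smallest count seen so far among slots 0, 2, 4 (None before slot 0)
--         if k == 6:
--             return -7 * m
--         c = present_counts[k]
--         if k % 2 == 0:
--             m = c if m is None or c < m else m
--         return 9 * c + area(k + 1, m)
--
--     return area(0, None) < volume
-- ===== Notes on version B (the rewrite author's own statement) =====
-- stated objective: alternative
-- what changed: Replaced prod/min/tuple-subtraction plus accumulation loop by a single recursive descent over the six slots that carries (running area, running minimum of slots 0/2/4) as accumulators and applies the 5x4-packing discount once at the base case.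
import Mathlib
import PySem

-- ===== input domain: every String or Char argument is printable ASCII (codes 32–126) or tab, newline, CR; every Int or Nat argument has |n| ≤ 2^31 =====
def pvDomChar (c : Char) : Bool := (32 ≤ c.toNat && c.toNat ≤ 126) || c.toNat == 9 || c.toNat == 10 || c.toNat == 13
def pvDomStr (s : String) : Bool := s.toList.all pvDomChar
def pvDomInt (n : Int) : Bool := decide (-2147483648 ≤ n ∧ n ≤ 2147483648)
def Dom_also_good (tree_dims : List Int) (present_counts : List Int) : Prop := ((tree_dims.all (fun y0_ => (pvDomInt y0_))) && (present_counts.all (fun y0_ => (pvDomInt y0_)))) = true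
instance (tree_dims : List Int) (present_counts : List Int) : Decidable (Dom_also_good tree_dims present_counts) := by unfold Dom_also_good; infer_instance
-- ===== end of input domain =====

-- B replaces prod/min/tuple-subtraction + accumulation loop by one recursive descent over
-- the six slots carrying the running minimum of slots 0/2/4; same cost, different decomposition.

-- ===== PORT A =====
def also_good (tree_dims : List Int) (present_counts : List Int) : Bool :=
  let total_size := tree_dims.foldl (· * ·) 1
  (((PySem.List.pyGet? present_counts 0).bind fun p0 =>
    (PySem.List.pyGet? present_counts 1).bind fun p1 =>
    (PySem.List.pyGet? present_counts 2).bind fun p2 =>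
    (PySem.List.pyGet? present_counts 3).bind fun p3 =>
    (PySem.List.pyGet? present_counts 4).bind fun p4 =>
    (PySem.List.pyGet? present_counts 5).map fun p5 =>
      let combo1 := min (min p0 p2) p4
      let max_area := combo1 * 20
      let new_counts := [p0 - combo1, p1, p2 - combo1, p3, p4 - combo1, p5]
      let max_area := new_counts.foldl (fun acc count => acc + 9 * count) max_area
      decide (max_area < total_size)).getD false)  -- none = IndexError in Python; outside Pre_

-- ===== PORT B =====
-- B's recursive helper `area(k, m)`; Python tests `k == 6` and only ever calls with k ≤ 6,
-- so the `6 ≤ k` guard used here for termination agrees with it on every reachable call.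
def alsoGoodArea (present_counts : List Int) (k : Nat) (m : Option Int) : Option Int :=
  if _h : 6 ≤ k then
    match m with
    | some v => some (-7 * v)
    | none => none  -- Python's `-7 * None` TypeError; unreachable from area(0, None)
  else
    match PySem.List.pyGet? present_counts (k : Int) with
    | none => none  -- IndexError; outside Pre_
    | some c =>
      let m' := if k % 2 == 0 then
          some (match m with | none => c | some v => if c < v then c else v)
        else m
      (alsoGoodArea present_counts (k + 1) m').map (fun rest => 9 * c + rest)
termination_by 6 - k

def also_good_alt (tree_dims : List Int) (present_counts : List Int) : Bool :=
  let volume := tree_dims.foldl (fun v d => v * d) 1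
  ((alsoGoodArea present_counts 0 none).map (fun a => decide (a < volume))).getD false

-- ===== PRECONDITION & SPEC =====
-- Pre_: A indexes present_counts[0..5], raising IndexError on shorter lists.
def Pre_also_good (tree_dims : List Int) (present_counts : List Int) : Prop :=
  6 ≤ present_counts.length
instance (tree_dims : List Int) (present_counts : List Int) : Decidable (Pre_also_good tree_dims present_counts) := by unfold Pre_also_good; infer_instance
def pvWitness_also_good : List Int × List Int := ([2, 3, 4], [1, 2, 1, 3, 1, 4])
def Spec_also_good (tree_dims : List Int) (present_counts : List Int) (out : Bool) : Prop := out = also_good_alt tree_dims present_counts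
instance (tree_dims : List Int) (present_counts : List Int) (out : Bool) : Decidable (Spec_also_good tree_dims present_counts out) := by unfold Spec_also_good; infer_instance

-- ===== CLAIM (what is proved, stated in full; the proofs are below) =====
def Claim_equal_also_good : Prop := ∀ (tree_dims : List Int) (present_counts : List Int), Dom_also_good tree_dims present_counts → Pre_also_good tree_dims present_counts → Spec_also_good tree_dims present_counts (also_good tree_dims present_counts)

-- ===== LEMMAS AND PROOFS =====

-- ===== VERDICT =====
theorem also_good_spec : Claim_equal_also_good := by
  intro tree_dims present_counts _ hpre
  unfold Pre_also_good at hpre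
  obtain ⟨p0, p1, p2, p3, p4, p5, rest, rfl⟩ :
      ∃ a b c d e f r, present_counts = a :: b :: c :: d :: e :: f :: r := by
    match present_counts, hpre with
    | a :: b :: c :: d :: e :: f :: r, _ => exact ⟨a, b, c, d, e, f, r, rfl⟩
  have h0 : PySem.List.pyGet? (p0 :: p1 :: p2 :: p3 :: p4 :: p5 :: rest) 0 = some p0 := by
    simpa using PySem.List.pyGet?_of_nonneg (xs := p0 :: p1 :: p2 :: p3 :: p4 :: p5 :: rest) (i := 0) (by norm_num)
  have h1 : PySem.List.pyGet? (p0 :: p1 :: p2 :: p3 :: p4 :: p5 :: rest) 1 = some p1 := by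
    simpa using PySem.List.pyGet?_of_nonneg (xs := p0 :: p1 :: p2 :: p3 :: p4 :: p5 :: rest) (i := 1) (by norm_num)
  have h2 : PySem.List.pyGet? (p0 :: p1 :: p2 :: p3 :: p4 :: p5 :: rest) 2 = some p2 := by
    simpa using PySem.List.pyGet?_of_nonneg (xs := p0 :: p1 :: p2 :: p3 :: p4 :: p5 :: rest) (i := 2) (by norm_num)
  have h3 : PySem.List.pyGet? (p0 :: p1 :: p2 :: p3 :: p4 :: p5 :: rest) 3 = some p3 := by
    simpa using PySem.List.pyGet?_of_nonneg (xs := p0 :: p1 :: p2 :: p3 :: p4 :: p5 :: rest) (i := 3) (by norm_num)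
  have h4 : PySem.List.pyGet? (p0 :: p1 :: p2 :: p3 :: p4 :: p5 :: rest) 4 = some p4 := by
    simpa using PySem.List.pyGet?_of_nonneg (xs := p0 :: p1 :: p2 :: p3 :: p4 :: p5 :: rest) (i := 4) (by norm_num)
  have h5 : PySem.List.pyGet? (p0 :: p1 :: p2 :: p3 :: p4 :: p5 :: rest) 5 = some p5 := by
    simpa using PySem.List.pyGet?_of_nonneg (xs := p0 :: p1 :: p2 :: p3 :: p4 :: p5 :: rest) (i := 5) (by norm_num)
  have harea : alsoGoodArea (p0 :: p1 :: p2 :: p3 :: p4 :: p5 :: rest) 0 none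
      = some (9 * p0 + (9 * p1 + (9 * p2 + (9 * p3 + (9 * p4 + (9 * p5 +
          -7 * (min (min p0 p2) p4))))))) := by
    simp [alsoGoodArea.eq_def, h0, h1, h2, h3, h4, h5, min_def]
    split_ifs <;> simp <;> omega
  simp only [Spec_also_good, also_good, also_good_alt, harea, h0, h1, h2, h3, h4, h5,
    Option.bind, Option.map, Option.getD, List.foldl]
  rw [decide_eq_decide]
  omega
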